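-- pv_equiv track=rewrite | github.com/yuxin101/skills | skills/dlawnsdk/frontend-backend-flow-test/scripts/audit_contracts.py | parse_excludes
-- ===== SOURCE A (Python) =====
-- def parse_excludes(values: list[str]) -> list[str]:
--     out: list[str] = []
--     for value in values:
--         for part in value.split(','):
--             cleaned = part.strip()
--             if cleaned:
--                 out.append(cleaned)
--     return sorted(set(out))
-- ===== SOURCE B (Python) =====
-- def _insert(xs: list[str], t: str) -> list[str]:
--     # binary search for t's insertion point in the sorted duplicate-free
--     # list xs; return xs unchanged if t is already there, else splice it in.
--     lo, hi = 0, len(xs)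
--     while lo < hi:
--         mid = (lo + hi) // 2
--         if xs[mid] < t:
--             lo = mid + 1
--         else:
--             hi = mid
--     if lo == len(xs) or xs[lo] != t:
--         return xs[:lo] + [t] + xs[lo:]
--     return xs
--
--
-- def parse_excludes(values: list[str]) -> list[str]:
--     # Online insertion sort with dedup: no set, no final sort.  The result
--     # list is maintained sorted and duplicate-free at every step; each
--     # cleaned token is placed by binary search (or skipped if present).
--     result: list[str] = []
--     for value in values:
--         for part in value.split(','):
--             t = part.strip()
--             if t:
--                 result = _insert(result, t)
--     return result
-- ===== Notes on version B (the rewrite author's own statement) =====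
-- stated objective: alternative
-- what changed: Instead of collecting all tokens and then calling sorted(set(...)), B maintains a sorted duplicate-free result list online: each cleaned token's position is found by a hand-written binary search and the token is spliced in there (or skipped if already present); there is no set and no sort call.
import Mathlib
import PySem

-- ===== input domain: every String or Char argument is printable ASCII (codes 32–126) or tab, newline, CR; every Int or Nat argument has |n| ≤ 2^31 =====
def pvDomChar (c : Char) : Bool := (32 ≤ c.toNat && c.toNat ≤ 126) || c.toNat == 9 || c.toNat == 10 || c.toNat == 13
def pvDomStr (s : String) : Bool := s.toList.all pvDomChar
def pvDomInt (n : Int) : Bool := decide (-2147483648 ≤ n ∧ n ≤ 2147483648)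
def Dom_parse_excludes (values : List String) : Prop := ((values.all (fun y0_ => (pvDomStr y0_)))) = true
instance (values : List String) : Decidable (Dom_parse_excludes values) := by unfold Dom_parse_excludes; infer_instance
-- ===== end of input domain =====

-- B replaces A's collect-all / set-dedup / final sort by an online sorted insertion:
-- each token is placed by binary search into a result list kept sorted and duplicate-free (alternative algorithm; no set, no sort call).

-- ===== PORT A =====
-- value.split(','): sep is a non-empty literal, so split? is always some; getD [] is never the default.
def parse_excludes (values : List String) : List String :=
  let out := values.foldl (fun out value =>
    ((PySem.Str.split? value ",").getD []).foldl (fun out part =>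
      let cleaned := PySem.Str.strip part
      if cleaned ≠ "" then out ++ [cleaned] else out) out) []
  PySem.List.sorted (PySem.Set.ofList out) (fun x => x) false

-- ===== PORT B =====
-- the while-loop binary search of Source B's _insert (xs[mid] is always in range: lo < hi ≤ |xs|);
-- structural recursion on a fuel bound hi - lo, a pure totality guard (the loop halves the span each step)
def pvBisectFuel (xs : List String) (t : String) : Nat → Nat → Nat → Nat
  | 0, lo, _ => lo
  | fuel + 1, lo, hi =>
    if lo < hi then
      let mid := (lo + hi) / 2
      if xs.getD mid "" < t then pvBisectFuel xs t fuel (mid + 1) hi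
      else pvBisectFuel xs t fuel lo mid
    else lo

def pvBisect (xs : List String) (t : String) (lo hi : Nat) : Nat :=
  pvBisectFuel xs t (hi - lo) lo hi

-- Source B's _insert: binary search, then either splice t in (xs[:lo] + [t] + xs[lo:]) or return xs
def pvInsert (xs : List String) (t : String) : List String :=
  let lo := pvBisect xs t 0 xs.length
  if lo = xs.length ∨ xs.getD lo "" ≠ t then xs.take lo ++ t :: xs.drop lo else xs

def parse_excludes_alt (values : List String) : List String :=
  values.foldl (fun result value =>
    ((PySem.Str.split? value ",").getD []).foldl (fun result part =>
      let t := PySem.Str.strip part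
      if t ≠ "" then pvInsert result t else result) result) []

-- ===== PRECONDITION & SPEC =====
def Spec_parse_excludes (values : List String) (out : List String) : Prop := out = parse_excludes_alt values
instance (values : List String) (out : List String) : Decidable (Spec_parse_excludes values out) := by unfold Spec_parse_excludes; infer_instance

-- ===== CLAIM =====
def Claim_equal_parse_excludes : Prop := ∀ (values : List String), Dom_parse_excludes values → Spec_parse_excludes values (parse_excludes values)

-- ===== LEMMAS AND PROOFS =====

-- the flat token list both programs traverse
def pvToks (values : List String) : List String :=
  values.flatMap (fun value =>
    ((PySem.Str.split? value ",").getD []).filterMap (fun p =>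
      if PySem.Str.strip p ≠ "" then some (PySem.Str.strip p) else none))

-- A-side: the nested append-loop produces the flat token list
theorem pvInnerTokA (l : List String) : ∀ (acc : List String),
    (l.foldl (fun out part =>
      let cleaned := PySem.Str.strip part
      if cleaned ≠ "" then out ++ [cleaned] else out) acc)
      = acc ++ l.filterMap (fun p =>
          if PySem.Str.strip p ≠ "" then some (PySem.Str.strip p) else none) := by
  induction l with
  | nil => intro acc; simp
  | cons p ps ih =>
    intro acc
    simp only [List.foldl_cons]
    by_cases h : PySem.Str.strip p = ""
    · rw [if_neg (not_not_intro h), ih]; simp [h]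
    · rw [if_pos h, ih]; simp [h]

theorem pvTokEqA (values : List String) : ∀ (acc : List String),
    (values.foldl (fun out value =>
      ((PySem.Str.split? value ",").getD []).foldl (fun out part =>
        let cleaned := PySem.Str.strip part
        if cleaned ≠ "" then out ++ [cleaned] else out) out) acc)
      = acc ++ pvToks values := by
  induction values with
  | nil => intro acc; simp [pvToks]
  | cons v vs ih =>
    intro acc
    simp only [List.foldl_cons]
    rw [pvInnerTokA, ih]
    simp [pvToks]

-- B-side: the nested insert-loop is a fold of pvInsert over the flat token list
theorem pvInnerTokB (l : List String) : ∀ (acc : List String),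
    (l.foldl (fun result part =>
      let t := PySem.Str.strip part
      if t ≠ "" then pvInsert result t else result) acc)
      = (l.filterMap (fun p =>
          if PySem.Str.strip p ≠ "" then some (PySem.Str.strip p) else none)).foldl pvInsert acc := by
  induction l with
  | nil => intro acc; simp
  | cons p ps ih =>
    intro acc
    simp only [List.foldl_cons]
    by_cases h : PySem.Str.strip p = ""
    · rw [if_neg (not_not_intro h), ih]; simp [h]
    · rw [if_pos h, ih]; simp [h]

theorem pvTokEqB (values : List String) : ∀ (acc : List String),
    (values.foldl (fun result value =>
      ((PySem.Str.split? value ",").getD []).foldl (fun result part =>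
        let t := PySem.Str.strip part
        if t ≠ "" then pvInsert result t else result) result) acc)
      = (pvToks values).foldl pvInsert acc := by
  induction values with
  | nil => intro acc; simp [pvToks]
  | cons v vs ih =>
    intro acc
    simp only [List.foldl_cons]
    rw [pvInnerTokB, ih]
    simp [pvToks, List.foldl_append]

-- binary-search invariant: everything left of the returned index is < t, everything right is ≥ t
theorem pvBisectFuel_spec (xs : List String) (t : String)
    (hmono : ∀ i j (_ : i < xs.length) (_ : j < xs.length), i < j → xs[i] < xs[j]) :
    ∀ fuel lo hi, hi - lo ≤ fuel → lo ≤ hi → hi ≤ xs.length →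
    (∀ i (_ : i < xs.length), i < lo → xs[i] < t) →
    (∀ i (_ : i < xs.length), hi ≤ i → t ≤ xs[i]) →
    (∀ i (_ : i < xs.length), i < pvBisectFuel xs t fuel lo hi → xs[i] < t) ∧
    (∀ i (_ : i < xs.length), pvBisectFuel xs t fuel lo hi ≤ i → t ≤ xs[i]) ∧
    pvBisectFuel xs t fuel lo hi ≤ xs.length := by
  intro fuel
  induction fuel with
  | zero =>
    intro lo hi hn hlh hhl hleft hright
    have : lo = hi := by omega
    subst this
    simp only [pvBisectFuel]
    exact ⟨hleft, fun i hi' hge => hright i hi' hge, hhl⟩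
  | succ f ih =>
    intro lo hi hn hlh hhl hleft hright
    simp only [pvBisectFuel]
    by_cases h : lo < hi
    · rw [if_pos h]
      have hmidlt : (lo + hi) / 2 < xs.length := by omega
      by_cases hc : xs.getD ((lo + hi) / 2) "" < t
      · simp only [if_pos hc]
        rw [List.getD_eq_getElem xs "" hmidlt] at hc
        refine ih _ _ (by omega) (by omega) hhl ?_ hright
        intro i hi' hlt
        rcases lt_or_ge i ((lo + hi) / 2) with h1 | h1
        · exact lt_trans (hmono i _ hi' hmidlt h1) hc
        · have : i = (lo + hi) / 2 := by omega
          subst this; exact hc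
      · simp only [if_neg hc]
        rw [List.getD_eq_getElem xs "" hmidlt] at hc
        push_neg at hc
        refine ih _ _ (by omega) (by omega) (by omega) hleft ?_
        intro i hi' hge
        rcases eq_or_lt_of_le hge with h1 | h1
        · have : xs[i] = xs[(lo + hi) / 2] := by congr 1; omega
          rw [this]; exact hc
        · exact le_trans hc (le_of_lt (hmono _ i hmidlt hi' h1))
    · rw [if_neg h]
      have : lo = hi := by omega
      subst this
      exact ⟨hleft, fun i hi' hge => hright i hi' hge, by omega⟩

-- one binary-search insert preserves strict sortedness and adds exactly t to the members
theorem pvInsert_spec (xs : List String) (t : String) (hpw : xs.Pairwise (· < ·)) :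
    (pvInsert xs t).Pairwise (· < ·) ∧ ∀ x, x ∈ pvInsert xs t ↔ x = t ∨ x ∈ xs := by
  have hmono : ∀ i j (_ : i < xs.length) (_ : j < xs.length), i < j → xs[i] < xs[j] := by
    intro i j hi hj hij
    exact List.pairwise_iff_getElem.mp hpw i j hi hj hij
  obtain ⟨h1, h2, h3⟩ := pvBisectFuel_spec xs t hmono (xs.length - 0) 0 xs.length le_rfl
    (by omega) le_rfl (by omega) (by intro i hi hge; omega)
  have key : pvInsert xs t =
      if pvBisectFuel xs t (xs.length - 0) 0 xs.length = xs.length ∨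
          xs.getD (pvBisectFuel xs t (xs.length - 0) 0 xs.length) "" ≠ t then
        xs.take (pvBisectFuel xs t (xs.length - 0) 0 xs.length) ++
          t :: xs.drop (pvBisectFuel xs t (xs.length - 0) 0 xs.length)
      else xs := rfl
  rw [key]
  set r := pvBisectFuel xs t (xs.length - 0) 0 xs.length with hr
  by_cases hcond : r = xs.length ∨ xs.getD r "" ≠ t
  · rw [if_pos hcond]
    constructor
    · -- Pairwise on the splice
      rw [List.pairwise_append]
      refine ⟨hpw.sublist (List.take_sublist r xs), ?_, ?_⟩
      · rw [List.pairwise_cons]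
        refine ⟨?_, hpw.sublist (List.drop_sublist r xs)⟩
        -- t < every element of the dropped suffix
        intro b hb
        obtain ⟨i, hi, hbi⟩ := List.mem_iff_getElem.mp hb
        rw [List.getElem_drop] at hbi
        have hlen : r + i < xs.length := by
          have := List.length_drop (l := xs) (i := r); omega
        have hle : t ≤ xs[r + i] := h2 (r + i) hlen (by omega)
        have hrlen : r < xs.length := by omega
        have hne : xs.getD r "" ≠ t := by
          rcases hcond with h | h
          · omega
          · exact h
        rw [List.getD_eq_getElem xs "" hrlen] at hne
        rcases Nat.eq_or_lt_of_le (Nat.le_add_right r i) with hi0 | hi0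
        · -- b = xs[r], and xs[r] ≠ t while t ≤ xs[r]
          subst hbi
          have : xs[r] = xs[r + i] := by congr 1
          rw [← this] at hle ⊢
          exact lt_of_le_of_ne hle (Ne.symm hne)
        · subst hbi
          exact lt_of_le_of_lt (h2 r hrlen le_rfl) (hmono r (r + i) hrlen hlen hi0)
      · -- everything taken is < t, hence < every element of t :: drop
        intro a ha b hb
        obtain ⟨i, hi, hai⟩ := List.mem_iff_getElem.mp ha
        rw [List.getElem_take] at hai
        have hilen : i < xs.length := by
          have := List.length_take (i := r) (l := xs)
          omega
        have hir : i < r := by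
          have := List.length_take (i := r) (l := xs)
          omega
        have hat : a < t := hai ▸ h1 i hilen hir
        rcases List.mem_cons.mp hb with rfl | hb'
        · exact hat
        · obtain ⟨j, hj, hbj⟩ := List.mem_iff_getElem.mp hb'
          rw [List.getElem_drop] at hbj
          have hjlen : r + j < xs.length := by
            have := List.length_drop (l := xs) (i := r); omega
          exact lt_of_lt_of_le hat (hbj ▸ h2 (r + j) hjlen (by omega))
    · intro x
      constructor
      · intro hx
        rcases List.mem_append.mp hx with h | h
        · exact Or.inr (List.mem_of_mem_take h)
        · rcases List.mem_cons.mp h with rfl | h'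
          · exact Or.inl rfl
          · exact Or.inr (List.mem_of_mem_drop h')
      · intro hx
        rcases hx with rfl | hx
        · exact List.mem_append.mpr (Or.inr List.mem_cons_self)
        · rw [← List.take_append_drop r xs] at hx
          rcases List.mem_append.mp hx with h | h
          · exact List.mem_append.mpr (Or.inl h)
          · exact List.mem_append.mpr (Or.inr (List.mem_cons_of_mem _ h))
  · rw [if_neg hcond]
    push_neg at hcond
    obtain ⟨hrlt, hrt⟩ := hcond
    have hrlen : r < xs.length := lt_of_le_of_ne h3 hrlt
    rw [List.getD_eq_getElem xs "" hrlen] at hrt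
    refine ⟨hpw, fun x => ?_⟩
    constructor
    · exact Or.inr
    · rintro (rfl | hx)
      · exact hrt ▸ List.getElem_mem hrlen
      · exact hx

-- folding pvInsert keeps strict sortedness and accumulates membership
theorem pvFold_insert (T : List String) : ∀ (s : List String), s.Pairwise (· < ·) →
    (T.foldl pvInsert s).Pairwise (· < ·) ∧
      ∀ x, (x ∈ T.foldl pvInsert s ↔ x ∈ s ∨ x ∈ T) := by
  induction T with
  | nil => intro s hs; exact ⟨hs, by simp⟩
  | cons t ts ih =>
    intro s hs
    obtain ⟨hins, hmem⟩ := pvInsert_spec s t hs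
    obtain ⟨h1, h2⟩ := ih (pvInsert s t) hins
    refine ⟨h1, fun x => ?_⟩
    rw [List.foldl_cons] at *
    rw [h2 x, hmem x]
    simp only [List.mem_cons]
    tauto

-- main fact: sorted(set(T)) equals the binary-insertion fold of T
theorem pvMain (T : List String) :
    PySem.List.sorted (PySem.Set.ofList T) (fun x => x) false = T.foldl pvInsert [] := by
  obtain ⟨hpw, hmem⟩ := pvFold_insert T [] (by simp)
  apply PySem.List.sorted_eq_of_perm_of_pairwise_lt
  · rw [List.perm_ext_iff_of_nodup (hpw.imp ne_of_lt) (PySem.Set.nodup_ofList T)]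
    intro a
    rw [hmem a, PySem.Set.mem_ofList]
    simp
  · exact hpw

-- ===== VERDICT =====
theorem parse_excludes_spec : Claim_equal_parse_excludes := by
  intro values _
  unfold Spec_parse_excludes parse_excludes parse_excludes_alt
  rw [pvTokEqA values [], pvTokEqB values [], List.nil_append]
  exact pvMain _
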